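-- pv_equiv track=rewrite | github.com/evaarakchieva/yandex-algorithms-trainings-5 | 2_sets_and_dictionaries/chessboard.py | count_figure_perimeter
-- ===== SOURCE A (Python) =====
-- def count_figure_perimeter(coordinates):
--     cells = set(tuple(coordinate) for coordinate in coordinates)
--     perimeter = 0
--     for x, y in cells:
--         for dx, dy in [(0, 1), (0, -1), (1, 0), (-1, 0)]:
--             if (x + dx, y + dy) not in cells:
--                 perimeter += 1
--     return perimeter
-- ===== SOURCE B (Python) =====
-- def count_figure_perimeter(coordinates):
--     cells = set(tuple(coordinate) for coordinate in coordinates)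
--     pairs = 0
--     for x, y in cells:
--         if (x + 1, y) in cells:
--             pairs += 1
--         if (x, y + 1) in cells:
--             pairs += 1
--     return 4 * len(cells) - 2 * pairs
-- ===== Notes on version B (the rewrite author's own statement) =====
-- stated objective: alternative
-- what changed: Instead of testing all four neighbours of every cell and counting exposed edges directly, B counts each shared interior edge once (checking only the (x+1,y) and (x,y+1) neighbours) and returns 4*|cells| - 2*pairs in closed form.
import Mathlib
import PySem

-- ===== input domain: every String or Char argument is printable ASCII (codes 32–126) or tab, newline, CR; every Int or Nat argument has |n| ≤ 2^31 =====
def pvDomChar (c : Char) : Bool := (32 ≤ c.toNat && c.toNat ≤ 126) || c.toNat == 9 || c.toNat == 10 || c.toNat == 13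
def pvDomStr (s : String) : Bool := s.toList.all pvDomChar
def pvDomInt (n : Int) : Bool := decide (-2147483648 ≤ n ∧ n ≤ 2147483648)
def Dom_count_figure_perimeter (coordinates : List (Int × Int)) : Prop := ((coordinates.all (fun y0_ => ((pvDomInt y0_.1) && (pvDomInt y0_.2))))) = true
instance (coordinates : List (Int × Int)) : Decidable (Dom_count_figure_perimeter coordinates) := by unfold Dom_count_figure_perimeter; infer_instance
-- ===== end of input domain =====

-- B counts each shared interior edge once (only +x and +y neighbours) and uses 4*|cells| - 2*pairs,
-- instead of A's direct count of exposed edges over all four neighbour directions (objective: alternative).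

-- ===== PORT A =====
def count_figure_perimeter (coordinates : List (Int × Int)) : Int :=
  let cells : PySem.Set (Int × Int) := PySem.Set.ofList coordinates
  cells.foldl (fun perimeter c =>
    ([((0:Int),(1:Int)), (0,-1), (1,0), (-1,0)]).foldl (fun perimeter d =>
      if ¬ PySem.Set.contains cells (c.1 + d.1, c.2 + d.2) then perimeter + 1 else perimeter)
      perimeter) 0

-- ===== PORT B =====
def count_figure_perimeter_alt (coordinates : List (Int × Int)) : Int :=
  let cells : PySem.Set (Int × Int) := PySem.Set.ofList coordinates
  let pairs : Int := cells.foldl (fun pairs c =>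
    let pairs := if PySem.Set.contains cells (c.1 + 1, c.2) then pairs + 1 else pairs
    if PySem.Set.contains cells (c.1, c.2 + 1) then pairs + 1 else pairs) 0
  4 * PySem.Set.len cells - 2 * pairs

-- ===== PRECONDITION & SPEC =====
def Spec_count_figure_perimeter (coordinates : List (Int × Int)) (out : Int) : Prop := out = count_figure_perimeter_alt coordinates
instance (coordinates : List (Int × Int)) (out : Int) : Decidable (Spec_count_figure_perimeter coordinates out) := by unfold Spec_count_figure_perimeter; infer_instance

-- ===== CLAIM (what is proved, stated in full; the proofs are below) =====
def Claim_equal_count_figure_perimeter : Prop := ∀ (coordinates : List (Int × Int)), Dom_count_figure_perimeter coordinates → Spec_count_figure_perimeter coordinates (count_figure_perimeter coordinates)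

-- ===== LEMMAS AND PROOFS =====

-- indicator of a boolean as an Int
def pvInd (b : Bool) : Int := if b then 1 else 0

theorem sum_map_ind {α : Type} (p : α → Bool) (l : List α) :
    (l.map (fun c => pvInd (p c))).sum = (l.countP p : Int) := by
  induction l with
  | nil => simp
  | cons a t ih =>
    rw [List.map_cons, List.sum_cons, ih, List.countP_cons]
    cases h : p a
    · simp [pvInd]
    · simp [pvInd]; ring

theorem sum_map_add_int {α : Type} (f g : α → Int) (l : List α) :
    (l.map (fun c => f c + g c)).sum = (l.map f).sum + (l.map g).sum := by
  induction l with
  | nil => simp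
  | cons a t ih => rw [List.map_cons, List.map_cons, List.map_cons,
      List.sum_cons, List.sum_cons, List.sum_cons, ih]; ring

theorem sum_map_shape {α : Type} (g1 g2 g3 g4 : α → Int) (l : List α) :
    (l.map (fun c => (1 - g1 c) + (1 - g2 c) + (1 - g3 c) + (1 - g4 c))).sum
      = 4 * (l.length : Int)
        - ((l.map g1).sum + (l.map g2).sum + (l.map g3).sum + (l.map g4).sum) := by
  induction l with
  | nil => simp
  | cons a t ih =>
    simp only [List.map_cons, List.sum_cons, List.length_cons, ih]
    push_cast; ring

-- shared-edge reindexing: over a duplicate-free list, counting cells whose (−d)-neighbour is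
-- present equals counting cells whose (+d)-neighbour is present (bijection c ↦ c + d)
theorem countP_shift (S : List (Int × Int)) (hnd : S.Nodup) (dx dy : Int) :
    S.countP (fun c => decide ((c.1 - dx, c.2 - dy) ∈ S))
      = S.countP (fun c => decide ((c.1 + dx, c.2 + dy) ∈ S)) := by
  have hperm :
      ((S.filter (fun c => decide ((c.1 + dx, c.2 + dy) ∈ S))).map
        (fun c => (c.1 + dx, c.2 + dy))).Perm
      (S.filter (fun c => decide ((c.1 - dx, c.2 - dy) ∈ S))) := by
    rw [List.perm_ext_iff_of_nodup]
    · intro y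
      simp only [List.mem_map, List.mem_filter, decide_eq_true_eq]
      constructor
      · rintro ⟨c, ⟨hc, hcd⟩, rfl⟩
        refine ⟨hcd, ?_⟩
        have heq : ((c.1 + dx) - dx, (c.2 + dy) - dy) = c := by
          cases c; simp only [Prod.mk.injEq]; constructor <;> ring
        rw [heq]; exact hc
      · rintro ⟨hy, hyd⟩
        refine ⟨(y.1 - dx, y.2 - dy), ⟨hyd, ?_⟩, ?_⟩
        · have heq : (y.1 - dx + dx, y.2 - dy + dy) = y := by
            cases y; simp only [Prod.mk.injEq]; constructor <;> ring
          rw [heq]; exact hy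
        · cases y; simp only [Prod.mk.injEq]; constructor <;> ring
    · refine List.Nodup.map ?_ (hnd.filter _)
      intro a b hab
      cases a; cases b
      simp only [Prod.mk.injEq] at hab ⊢
      omega
    · exact hnd.filter _
  have h1 := hperm.length_eq
  rw [List.length_map] at h1
  rw [← List.countP_eq_length_filter, ← List.countP_eq_length_filter] at h1
  exact h1.symm

-- the inner 4-direction loop of A, as a closed sum of indicators
theorem innerA (S : List (Int × Int)) (per : Int) (c : Int × Int) :
    ([((0:Int),(1:Int)), (0,-1), (1,0), (-1,0)]).foldl (fun perimeter d =>
      if ¬ PySem.Set.contains S (c.1 + d.1, c.2 + d.2) then perimeter + 1 else perimeter) per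
    = per + ((1 - pvInd (S.contains (c.1, c.2 + 1))) + (1 - pvInd (S.contains (c.1, c.2 - 1)))
        + (1 - pvInd (S.contains (c.1 + 1, c.2))) + (1 - pvInd (S.contains (c.1 - 1, c.2)))) := by
  simp only [List.foldl, PySem.Set.contains, pvInd]
  have e1 : c.1 + (0:Int) = c.1 := add_zero _
  have e2 : c.2 + (0:Int) = c.2 := add_zero _
  have e3 : c.2 + (-1:Int) = c.2 - 1 := by ring
  have e4 : c.1 + (-1:Int) = c.1 - 1 := by ring
  rw [e1, e2, e3, e4]
  split_ifs <;> omega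

-- the body of B's loop, as indicators
theorem innerB (S : List (Int × Int)) (p : Int) (c : Int × Int) :
    (let pairs := if PySem.Set.contains S (c.1 + 1, c.2) then p + 1 else p
     if PySem.Set.contains S (c.1, c.2 + 1) then pairs + 1 else pairs)
    = p + (pvInd (S.contains (c.1 + 1, c.2)) + pvInd (S.contains (c.1, c.2 + 1))) := by
  simp only [PySem.Set.contains, pvInd]
  split_ifs <;> omega

theorem count_figure_perimeter_eq (coordinates : List (Int × Int)) :
    count_figure_perimeter coordinates = count_figure_perimeter_alt coordinates := by
  unfold count_figure_perimeter count_figure_perimeter_alt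
  set S : List (Int × Int) := PySem.Set.ofList coordinates with hS
  have hnd : S.Nodup := PySem.Set.nodup_ofList coordinates
  have hA : S.foldl (fun perimeter c =>
      ([((0:Int),(1:Int)), (0,-1), (1,0), (-1,0)]).foldl (fun perimeter d =>
        if ¬ PySem.Set.contains S (c.1 + d.1, c.2 + d.2) then perimeter + 1 else perimeter)
        perimeter) 0
      = (S.map (fun c => (1 - pvInd (S.contains (c.1, c.2 + 1)))
          + (1 - pvInd (S.contains (c.1, c.2 - 1)))
          + (1 - pvInd (S.contains (c.1 + 1, c.2)))
          + (1 - pvInd (S.contains (c.1 - 1, c.2))))).sum := by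
    rw [PySem.List.foldl_congr_mem S _ (fun per c => per +
        ((1 - pvInd (S.contains (c.1, c.2 + 1))) + (1 - pvInd (S.contains (c.1, c.2 - 1)))
          + (1 - pvInd (S.contains (c.1 + 1, c.2))) + (1 - pvInd (S.contains (c.1 - 1, c.2))))) 0
        (fun acc x _ => innerA S acc x)]
    rw [PySem.List.foldl_add]
    ring
  have hB : S.foldl (fun pairs c =>
      let pairs := if PySem.Set.contains S (c.1 + 1, c.2) then pairs + 1 else pairs
      if PySem.Set.contains S (c.1, c.2 + 1) then pairs + 1 else pairs) 0
      = (S.map (fun c => pvInd (S.contains (c.1 + 1, c.2)) + pvInd (S.contains (c.1, c.2 + 1)))).sum := by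
    rw [PySem.List.foldl_congr_mem S _ (fun p c => p +
        (pvInd (S.contains (c.1 + 1, c.2)) + pvInd (S.contains (c.1, c.2 + 1)))) 0
        (fun acc x _ => innerB S acc x)]
    rw [PySem.List.foldl_add]
    ring
  simp only [hA, hB]
  rw [sum_map_shape]
  have hmem : ∀ (g : (Int × Int) → (Int × Int)),
      (S.map (fun c => pvInd (S.contains (g c)))).sum
        = ((S.countP (fun c => decide (g c ∈ S)) : Nat) : Int) := by
    intro g
    rw [← sum_map_ind]
    refine congrArg _ (List.map_congr_left (fun c _ => ?_))
    refine congrArg pvInd ?_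
    by_cases h : g c ∈ S <;> simp [h]
  have hx0 := countP_shift S hnd 1 0
  simp only [sub_zero, add_zero] at hx0
  have hy0 := countP_shift S hnd 0 1
  simp only [sub_zero, add_zero] at hy0
  have hx : (S.map (fun c => pvInd (S.contains (c.1 - 1, c.2)))).sum
      = (S.map (fun c => pvInd (S.contains (c.1 + 1, c.2)))).sum := by
    rw [hmem (fun c => (c.1 - 1, c.2)), hmem (fun c => (c.1 + 1, c.2))]
    exact_mod_cast hx0
  have hy : (S.map (fun c => pvInd (S.contains (c.1, c.2 - 1)))).sum
      = (S.map (fun c => pvInd (S.contains (c.1, c.2 + 1)))).sum := by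
    rw [hmem (fun c => (c.1, c.2 - 1)), hmem (fun c => (c.1, c.2 + 1))]
    exact_mod_cast hy0
  rw [hx, hy, sum_map_add_int]
  have hlen : PySem.Set.len S = (S.length : Int) := rfl
  rw [hlen]
  ring

-- ===== VERDICT (by name: the statement is the Claim_ definition above) =====
theorem count_figure_perimeter_spec : Claim_equal_count_figure_perimeter := by
  intro coordinates _
  unfold Spec_count_figure_perimeter
  exact count_figure_perimeter_eq coordinates
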